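-- pv_equiv track=rewrite | github.com/BenSmithers/Cascade-Smearing | utils.py | bad_get_loc
-- ===== SOURCE A (Python) =====
-- def bad_get_loc(value, edges):
--     """
--     Deprecated, don't use. Just use 'get_loc'
--     """
--     if value<edges[0] or value>edges[-1]:
--         return None
--     else:
--         scan = 0
--         while not (value>=edges[scan] and value<=edges[scan+1]): # remember, the edges are sorted - so this should happen
--             scan += 1
--             if scan==len(edges)-1:
--                 raise Exception("Something bad happened with logic")
--         return(scan)
-- ===== SOURCE B (Python) =====
-- def bad_get_loc(value, edges):
--     # Binary search for the leftmost index m with edges[m] >= value,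
--     # then the containing bin is max(0, m-1).
--     if value < edges[0] or value > edges[-1]:
--         return None
--     lo, hi = 0, len(edges) - 1
--     while lo < hi:
--         mid = (lo + hi) // 2
--         if edges[mid] >= value:
--             hi = mid
--         else:
--             lo = mid + 1
--     return max(0, lo - 1)
-- ===== Notes on version B (the rewrite author's own statement) =====
-- stated objective: faster
-- what changed: Replaces the left-to-right linear scan over consecutive edge pairs by a halving (binary) search for the leftmost edge >= value, returning max(0, m-1).
-- outside the precondition, e.g. on bad_get_loc(-2, [-4, -2, -3, 3, -3, -2]): A returns 0, B returns 4
import Mathlib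
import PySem

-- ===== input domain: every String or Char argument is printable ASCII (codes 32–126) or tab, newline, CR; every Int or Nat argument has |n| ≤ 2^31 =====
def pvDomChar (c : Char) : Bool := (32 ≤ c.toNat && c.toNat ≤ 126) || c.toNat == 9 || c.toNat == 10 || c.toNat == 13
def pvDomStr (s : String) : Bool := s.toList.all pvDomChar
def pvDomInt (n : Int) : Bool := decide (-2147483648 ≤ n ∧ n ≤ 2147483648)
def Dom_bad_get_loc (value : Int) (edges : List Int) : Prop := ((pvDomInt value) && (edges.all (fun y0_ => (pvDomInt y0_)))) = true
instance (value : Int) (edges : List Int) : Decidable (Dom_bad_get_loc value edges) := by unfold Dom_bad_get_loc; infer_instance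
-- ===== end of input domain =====

-- B replaces A's linear scan over consecutive edge pairs by a halving (binary) search
-- for the leftmost edge ≥ value (objective: faster, O(log n) vs O(n)).

-- ===== PORT A =====
-- the while loop: check bracketing at scan; else scan += 1; raise (→ none) when scan = len-1
def badGetLocLoop (value : Int) (edges : List Int) (scan : Nat) : Option Int :=
  match h1 : PySem.List.pyGet? edges (scan : Int), h2 : PySem.List.pyGet? edges ((scan : Int) + 1) with
  | some a, some b =>
      if value ≥ a ∧ value ≤ b then some (scan : Int)
      else if scan + 1 = edges.length - 1 then none   -- raise Exception("Something bad happened with logic")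
      else badGetLocLoop value edges (scan + 1)
  | _, _ => none                                      -- IndexError
termination_by edges.length - scan
decreasing_by
  have : (scan : Int) + 1 = ((scan + 1 : Nat) : Int) := by push_cast; ring
  rw [this, PySem.List.pyGet?_natCast] at h2
  have := (List.getElem?_eq_some_iff.mp h2).1
  omega

def bad_get_loc (value : Int) (edges : List Int) : Option Int :=
  match PySem.List.pyGet? edges 0, PySem.List.pyGet? edges (-1) with
  | some e0, some el =>
      if value < e0 ∨ value > el then none
      else badGetLocLoop value edges 0
  | _, _ => none                                      -- IndexError on empty edges

-- ===== PORT B =====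
-- halving loop: leftmost index m in [lo, hi] with edges[m] ≥ value
-- (edges.getD mid 0 is exact here: mid is always in range when the loop is entered with hi < len)
def bisectLoop (value : Int) (edges : List Int) (lo hi : Nat) : Nat :=
  if lo < hi then
    let mid := (lo + hi) / 2
    if value ≤ edges.getD mid 0 then bisectLoop value edges lo mid
    else bisectLoop value edges (mid + 1) hi
  else lo
termination_by hi - lo
decreasing_by all_goals omega

def bad_get_loc_alt (value : Int) (edges : List Int) : Option Int :=
  match PySem.List.pyGet? edges 0, PySem.List.pyGet? edges (-1) with
  | some e0, some el =>
      if value < e0 ∨ value > el then none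
      else some (max 0 ((bisectLoop value edges 0 (edges.length - 1) : Int) - 1))
  | _, _ => none                                      -- IndexError on empty edges

-- ===== PRECONDITION & SPEC =====
-- Pre_ excludes: empty edges (A raises IndexError), a single edge equal to value (A raises
-- IndexError reading edges[1]), and unsorted edges whose value lies inside [edges[0], edges[-1]] —
-- bin edges are sorted by contract, and on such contract-violating input A's result is an
-- artefact of the left-to-right visiting order (out-of-range values stay inside Pre_: both return None).
def Pre_bad_get_loc (value : Int) (edges : List Int) : Prop :=
  edges ≠ [] ∧
  (edges.Pairwise (· ≤ ·) ∨ value < edges.getD 0 0 ∨ edges.getD (edges.length - 1) 0 < value) ∧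
  ¬(edges.length = 1 ∧ value = edges.getD 0 0)
instance (value : Int) (edges : List Int) : Decidable (Pre_bad_get_loc value edges) := by
  unfold Pre_bad_get_loc; infer_instance

def pvWitness_bad_get_loc : Int × List Int := (2, [0, 1, 3])

def Spec_bad_get_loc (value : Int) (edges : List Int) (out : Option Int) : Prop := out = bad_get_loc_alt value edges
instance (value : Int) (edges : List Int) (out : Option Int) : Decidable (Spec_bad_get_loc value edges out) := by unfold Spec_bad_get_loc; infer_instance

-- ===== CLAIM (what is proved, stated in full; the proofs are below) =====
def Claim_equal_bad_get_loc : Prop := ∀ (value : Int) (edges : List Int), Dom_bad_get_loc value edges → Pre_bad_get_loc value edges → Spec_bad_get_loc value edges (bad_get_loc value edges)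

-- ===== LEMMAS AND PROOFS =====

-- sorted edges are pointwise monotone
lemma edges_mono (edges : List Int) (hs : edges.Pairwise (· ≤ ·)) {i j : Nat}
    (hij : i ≤ j) (hj : j < edges.length) : edges[i]'(by omega) ≤ edges[j] := by
  rcases Nat.lt_or_ge i j with h | h
  · exact (List.pairwise_iff_getElem.mp hs) i j (by omega) hj h
  · have : i = j := by omega
    subst this; exact le_refl _

-- the halving loop returns the leftmost m with edges[m] ≥ value, given lo ≤ m ≤ hi
lemma bisect_eq (value : Int) (edges : List Int) (hs : edges.Pairwise (· ≤ ·))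
    (m : Nat) (hm : m < edges.length) (hvm : value ≤ edges[m])
    (hlt : ∀ k (_ : k < edges.length), k < m → edges[k] < value)
    (lo hi : Nat) (hlom : lo ≤ m) (hmhi : m ≤ hi) (hhi : hi < edges.length) :
    bisectLoop value edges lo hi = m := by
  unfold bisectLoop
  by_cases hlh : lo < hi
  · simp only [hlh, if_true]
    have hmidlt : (lo + hi) / 2 < edges.length := by omega
    have hgetD : edges.getD ((lo + hi) / 2) 0 = edges[(lo + hi) / 2] :=
      List.getD_eq_getElem edges 0 hmidlt
    by_cases hcmp : value ≤ edges.getD ((lo + hi) / 2) 0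
    · simp only [hcmp, if_true]
      have hmle : m ≤ (lo + hi) / 2 := by
        by_contra hc
        have := hlt ((lo + hi) / 2) hmidlt (by omega)
        rw [hgetD] at hcmp; omega
      exact bisect_eq value edges hs m hm hvm hlt lo ((lo + hi) / 2) hlom hmle (by omega)
    · simp only [hcmp, if_false]
      have hmgt : (lo + hi) / 2 < m := by
        by_contra hc
        have := edges_mono edges hs (i := m) (j := (lo + hi) / 2) (by omega) hmidlt
        rw [hgetD] at hcmp; omega
      exact bisect_eq value edges hs m hm hvm hlt ((lo + hi) / 2 + 1) hi (by omega) hmhi hhi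
  · simp only [hlh, if_false]; omega
termination_by hi - lo
decreasing_by all_goals omega

-- A's scan returns m-1 (0 if m = 0): induction from any scan ≤ m-1
lemma scan_eq (value : Int) (edges : List Int) (hs : edges.Pairwise (· ≤ ·))
    (hlen : 2 ≤ edges.length) (h0 : edges[0]'(by omega) ≤ value)
    (m : Nat) (hm : m < edges.length) (hvm : value ≤ edges[m])
    (hlt : ∀ k (_ : k < edges.length), k < m → edges[k] < value)
    (scan : Nat) (hscan : scan ≤ m - 1) :
    badGetLocLoop value edges scan = some ((m - 1 : Nat) : Int) := by
  have hj2 : m - 1 ≤ edges.length - 2 := by omega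
  have hs1 : scan < edges.length := by omega
  have hs2 : scan + 1 < edges.length := by omega
  unfold badGetLocLoop
  have e1 : PySem.List.pyGet? edges (scan : Int) = some (edges[scan]) := by
    rw [PySem.List.pyGet?_natCast]; exact List.getElem?_eq_getElem hs1
  have e2 : PySem.List.pyGet? edges ((scan : Int) + 1) = some (edges[scan + 1]) := by
    have : (scan : Int) + 1 = ((scan + 1 : Nat) : Int) := by push_cast; ring
    rw [this, PySem.List.pyGet?_natCast]; exact List.getElem?_eq_getElem hs2
  rw [e1, e2]
  by_cases hend : scan = m - 1
  · subst hend
    have hcond : value ≥ edges[m - 1] ∧ value ≤ edges[m - 1 + 1] := by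
      constructor
      · rcases Nat.eq_zero_or_pos m with h | h
        · simp only [h]; exact h0
        · exact le_of_lt (hlt (m - 1) (by omega) (by omega))
      · rcases Nat.eq_zero_or_pos m with h | h
        · subst h
          calc value ≤ edges[0] := by simpa using hvm
            _ ≤ edges[0 + 1] := edges_mono edges hs (by omega) (by omega)
        · have : m - 1 + 1 = m := by omega
          simp only [this]; exact hvm
    simp only [hcond, and_self, if_true]
  · have hlt1 : scan + 1 ≤ m - 1 := by omega
    have hnc : ¬(value ≥ edges[scan] ∧ value ≤ edges[scan + 1]) := by
      intro ⟨_, hc2⟩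
      have := hlt (scan + 1) hs2 (by omega)
      omega
    simp only [hnc, if_false]
    have hnr : ¬(scan + 1 = edges.length - 1) := by omega
    simp only [hnr, if_false]
    exact scan_eq value edges hs hlen h0 m hm hvm hlt (scan + 1) hlt1
termination_by m - 1 - scan
decreasing_by omega

theorem bad_get_loc_spec : Claim_equal_bad_get_loc := by
  intro value edges _ hpre
  obtain ⟨hne, hsort', hcorner⟩ := hpre
  unfold Spec_bad_get_loc bad_get_loc bad_get_loc_alt
  have hpos : 0 < edges.length := List.length_pos_iff.mpr hne
  have e0 : PySem.List.pyGet? edges 0 = some (edges[0]) := by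
    rw [PySem.List.pyGet?_zero]; exact List.getElem?_eq_getElem hpos
  have elast : PySem.List.pyGet? edges (-1) = some (edges[edges.length - 1]'(by omega)) := by
    rw [PySem.List.pyGet?_neg_one, List.getLast?_eq_getElem?]
    exact List.getElem?_eq_getElem (by omega)
  rw [e0, elast]
  by_cases hguard : value < edges[0] ∨ value > edges[edges.length - 1]'(by omega)
  · simp only [hguard, if_true]
  · simp only [hguard, if_false]
    push Not at hguard
    obtain ⟨hge0, hlelast⟩ := hguard
    have hsort : edges.Pairwise (· ≤ ·) := by
      rcases hsort' with h | h | h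
      · exact h
      · rw [List.getD_eq_getElem edges 0 hpos] at h; omega
      · rw [List.getD_eq_getElem edges 0 (by omega : edges.length - 1 < edges.length)] at h
        omega
    have hlen : 2 ≤ edges.length := by
      by_contra hc
      have h1 : edges.length = 1 := by omega
      apply hcorner
      refine ⟨h1, ?_⟩
      have : edges.getD 0 0 = edges[0] := List.getD_eq_getElem edges 0 hpos
      rw [this]
      have h10 : edges.length - 1 = 0 := by omega
      simp only [h10] at hlelast
      omega
    -- m: leftmost index with edges[m] ≥ value
    set m := edges.findIdx (fun e => decide (value ≤ e)) with hmdef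
    have hm : m < edges.length := by
      apply List.findIdx_lt_length_of_exists
      exact ⟨edges[edges.length - 1]'(by omega), List.getElem_mem _, by simpa using hlelast⟩
    have hvm : value ≤ edges[m] := by
      have := List.findIdx_getElem (p := fun e => decide (value ≤ e)) (xs := edges) (w := hm)
      simpa using this
    have hlt : ∀ k (_ : k < edges.length), k < m → edges[k] < value := by
      intro k hk hkm
      have := List.not_of_lt_findIdx (p := fun e => decide (value ≤ e)) (xs := edges) (i := k) hkm
      simp only [decide_eq_false_iff_not, not_le] at this
      exact this
    rw [scan_eq value edges hsort hlen hge0 m hm hvm hlt 0 (by omega)]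
    rw [bisect_eq value edges hsort m hm hvm hlt 0 (edges.length - 1) (by omega) (by omega) (by omega)]
    congr 1
    omega
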